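-- pv_equiv track=rewrite | github.com/ChickenNuggets50/CS-3500-Programming-Languages-and-Translators | 2023-FS-101-hw1-lgs6bv-master/2023-FS-101-hw1-lgs6bv-master/lexer.py | is_valid_string_literal
-- ===== SOURCE A (Python) =====
-- def is_valid_string_literal(string):
--     state = 0
--     invalid_digits = set(' "')
--     for c in string:
--         if state == 0:
--             if c == '"':
--                 state = 1
--             else:
--                 state = 3
--         elif state == 1:
--             if c not in invalid_digits:
--                 state = 1
--             elif c == '"':
--                 state = 2
--             else:
--                 state = 3
--         else:
--             state = 3
--
--     if state == 2:
--         return True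
--     else:
--         return False
-- ===== SOURCE B (Python) =====
-- def is_valid_string_literal(string):
--     if len(string) < 2:
--         return False
--     if string[0] != '"' or string[-1] != '"':
--         return False
--     return all(c not in ' "' for c in string[1:-1])
-- ===== Notes on version B (the rewrite author's own statement) =====
-- stated objective: simpler
-- what changed: Replaced the per-character finite-state machine with a direct structural check: both boundary characters must be quotes and the interior slice string[1:-1] must contain no space or quote.
import Mathlib
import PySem

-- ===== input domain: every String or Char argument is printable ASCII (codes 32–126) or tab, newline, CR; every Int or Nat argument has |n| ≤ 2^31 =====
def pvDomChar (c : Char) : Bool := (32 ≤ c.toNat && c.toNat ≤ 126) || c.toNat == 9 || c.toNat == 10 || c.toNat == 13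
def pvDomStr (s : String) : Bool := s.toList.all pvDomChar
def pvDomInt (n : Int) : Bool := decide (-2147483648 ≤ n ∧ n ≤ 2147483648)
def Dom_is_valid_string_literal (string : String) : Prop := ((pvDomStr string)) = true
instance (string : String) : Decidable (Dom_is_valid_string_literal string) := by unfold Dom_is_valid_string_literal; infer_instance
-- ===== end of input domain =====

-- B replaces A's per-character finite-state machine by a direct structural check
-- (the two boundary quotes plus a scan of the interior slice); objective: simpler.

-- ===== PORT A =====
-- the loop body of A's for-loop, acting on the integer state
def pvStepA (invalid_digits : PySem.Set Char) (state : Int) (c : Char) : Int :=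
  if state = 0 then
    (if c = '"' then 1 else 3)
  else if state = 1 then
    (if ¬ PySem.Set.contains invalid_digits c then 1
     else if c = '"' then 2
     else 3)
  else 3

def is_valid_string_literal (string : String) : Bool :=
  let invalid_digits : PySem.Set Char := PySem.Set.ofList [' ', '"']
  let state := string.toList.foldl (pvStepA invalid_digits) 0
  if state = 2 then true else false

-- ===== PORT B =====
def is_valid_string_literal_alt (string : String) : Bool :=
  if string.toList.length < 2 then false
  else if PySem.List.pyGet? string.toList 0 ≠ some '"' ∨
          PySem.List.pyGet? string.toList (-1) ≠ some '"' then false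
  else (PySem.List.slice string.toList (some 1) (some (-1))).all
        (fun c => !(decide (c = ' ' ∨ c = '"')))

-- ===== PRECONDITION & SPEC =====
def Spec_is_valid_string_literal (string : String) (out : Bool) : Prop := out = is_valid_string_literal_alt string
instance (string : String) (out : Bool) : Decidable (Spec_is_valid_string_literal string out) := by unfold Spec_is_valid_string_literal; infer_instance

-- ===== CLAIM (what is proved, stated in full; the proofs are below) =====
def Claim_equal_is_valid_string_literal : Prop := ∀ (string : String), Dom_is_valid_string_literal string → Spec_is_valid_string_literal string (is_valid_string_literal string)

-- ===== LEMMAS AND PROOFS =====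

theorem pv_step3 (inv : PySem.Set Char) (l : List Char) :
    l.foldl (pvStepA inv) 3 = 3 := by
  induction l with
  | nil => rfl
  | cons c rest ih => simpa [pvStepA] using ih

theorem pv_step2 (inv : PySem.Set Char) (l : List Char) :
    l.foldl (pvStepA inv) 2 = (if l = [] then 2 else 3) := by
  cases l with
  | nil => rfl
  | cons c rest => simp [pvStepA, pv_step3]

theorem pv_step1c (c : Char) :
    pvStepA (PySem.Set.ofList [' ', '"']) 1 c =
      if c = '"' then 2 else if c = ' ' then 3 else 1 := by
  simp only [pvStepA, PySem.Set.contains, PySem.Set.ofList, PySem.Set.empty]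
  by_cases h1 : c = '"' <;> by_cases h2 : c = ' ' <;> simp [h1, h2]

theorem pv_run1 (l : List Char) :
    (l.foldl (pvStepA (PySem.Set.ofList [' ', '"'])) 1 = 2) ↔
      (l ≠ [] ∧ l.getLast? = some '"' ∧ ∀ c ∈ l.dropLast, c ≠ ' ' ∧ c ≠ '"') := by
  induction l with
  | nil => simp
  | cons c rest ih =>
    rw [List.foldl_cons, pv_step1c]
    by_cases hq : c = '"'
    · subst hq
      rw [if_pos rfl, pv_step2]
      cases rest with
      | nil => simp
      | cons d rs =>
        rw [show ('"' :: d :: rs).dropLast = '"' :: (d :: rs).dropLast from rfl]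
        constructor
        · intro h; exact absurd h (by simp)
        · rintro ⟨_, _, h⟩
          exact absurd (h '"' (by simp)) (by simp)
    · by_cases hs : c = ' '
      · subst hs
        rw [if_neg hq, if_pos rfl, pv_step3]
        cases rest with
        | nil => simp
        | cons d rs =>
          rw [show (' ' :: d :: rs).dropLast = ' ' :: (d :: rs).dropLast from rfl]
          constructor
          · intro h; exact absurd h (by simp)
          · rintro ⟨_, _, h⟩
            exact absurd (h ' ' (by simp)) (by simp)
      · rw [if_neg hq, if_neg hs, ih]
        cases rest with
        | nil => simp [hq]
        | cons d rs =>
          rw [show (c :: d :: rs).dropLast = c :: (d :: rs).dropLast from rfl]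
          simp only [List.getLast?_cons_cons, ne_eq, reduceCtorEq, not_false_iff, true_and,
            List.mem_cons]
          constructor
          · rintro ⟨h1, h2⟩
            refine ⟨h1, ?_⟩
            rintro x (hx | hx)
            · subst hx; exact ⟨hs, hq⟩
            · exact h2 x hx
          · rintro ⟨h1, h2⟩
            exact ⟨h1, fun x hx => h2 x (Or.inr hx)⟩

theorem pv_slice_interior (c : Char) (rest : List Char) :
    PySem.List.slice (c :: rest) (some 1) (some (-1)) = rest.dropLast := by
  cases rest with
  | nil => simp [PySem.List.slice]
  | cons d rs =>
    have h1 : PySem.List.slice (c :: d :: rs) (some ((1 : Nat) : Int)) (some (-1)) =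
        ((c :: d :: rs).take ((c :: d :: rs).length - 1)).drop 1 := by
      rw [PySem.List.slice]
      simp
    simpa [List.dropLast_eq_take] using h1

theorem pv_step0 (c : Char) :
    pvStepA (PySem.Set.ofList [' ', '"']) 0 c = if c = '"' then 1 else 3 := by
  simp [pvStepA]

-- ===== VERDICT (by name: the statement is the Claim_ definition above) =====
theorem is_valid_string_literal_spec : Claim_equal_is_valid_string_literal := by
  unfold Claim_equal_is_valid_string_literal
  intro s _
  unfold Spec_is_valid_string_literal is_valid_string_literal is_valid_string_literal_alt
  dsimp only
  cases hl : s.toList with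
  | nil => simp
  | cons c rest =>
    rw [List.foldl_cons, pv_step0]
    by_cases hq : c = '"'
    · subst hq
      rw [if_pos rfl]
      cases rest with
      | nil => simp
      | cons d rs =>
        have hlen : ¬ ('"' :: d :: rs : List Char).length < 2 := by simp
        have hget0 : PySem.List.pyGet? ('"' :: d :: rs : List Char) 0 = some '"' :=
          PySem.List.pyGet?_zero_cons _ _
        rw [pv_slice_interior]
        simp only [hlen, if_false, hget0, PySem.List.pyGet?_neg_one, ne_eq,
          List.getLast?_cons_cons]
        by_cases hrun : (d :: rs).foldl (pvStepA (PySem.Set.ofList [' ', '"'])) 1 = 2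
        · rw [if_pos hrun]
          obtain ⟨-, hlast, hmid⟩ := (pv_run1 (d :: rs)).mp hrun
          rw [if_neg (by simp [hlast])]
          symm
          simp only [List.all_eq_true, Bool.not_eq_eq_eq_not, Bool.not_true,
            decide_eq_false_iff_not, not_or]
          exact fun x hx => hmid x hx
        · rw [if_neg hrun]
          by_cases hlast : (d :: rs).getLast? = some '"'
          · rw [if_neg (by simp [hlast])]
            symm
            rw [Bool.eq_false_iff]
            intro hall
            apply hrun
            apply (pv_run1 (d :: rs)).mpr
            refine ⟨by simp, hlast, ?_⟩
            intro x hx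
            have := List.all_eq_true.mp hall x hx
            simp only [Bool.not_eq_eq_eq_not, Bool.not_true, decide_eq_false_iff_not,
              not_or] at this
            exact this
          · rw [if_pos (by simp [hlast])]
    · rw [if_neg hq, pv_step3]
      have hget0 : PySem.List.pyGet? (c :: rest) 0 = some c := PySem.List.pyGet?_zero_cons _ _
      simp [hq]
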